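-- pv_equiv track=rewrite | github.com/ichar/recruit.flask | app/utils.py | worder
-- ===== SOURCE A (Python) =====
-- _MAX_TITLE_WORD_LEN = 50
--
-- def worder(value, length=None, comma=None):
--     max_len = (not length or length < 0) and _MAX_TITLE_WORD_LEN or length
--     words = value.split()
--     s = ''
--     changed = 0
--     while len(words):
--         word = words.pop(0).strip()
--         if s:
--             s += ' '
--         if len(word) <= max_len:
--             s += word
--         else:
--             w = word[max_len:]
--             if comma and comma in w:
--                 words = ['%s%s%s' % (x.strip(), comma, ' ') for x in w.split(comma)] + words
--             else:
--                 words.insert(0, w)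
--             s += word[:max_len]
--             changed = 1
--     s = s.strip()
--     if comma and s.endswith(comma):
--         s = s[:-1]
--     return changed, s
-- ===== SOURCE B (Python) =====
-- def worder(value, length=None, comma=None):
--     # Same truncation/wrapping, but decomposed per word: one emitter with an
--     # inner chopping loop (recursing only on comma pieces) appends chunks to a
--     # shared list, space-joined once at the end; no global mutable worklist.
--     m = length if length and length > 0 else 50
--     pieces = []
--     changed = False
--
--     def emit(frag):
--         nonlocal changed
--         while True:
--             frag = frag.strip()
--             if len(frag) <= m:
--                 pieces.append(frag)
--                 return
--             changed = True
--             pieces.append(frag[:m])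
--             frag = frag[m:]
--             if comma and comma in frag:
--                 for p in frag.split(comma):
--                     emit(p.strip() + comma + ' ')
--                 return
--
--     for w in value.split():
--         emit(w)
--     s = ' '.join(pieces).strip()
--     if comma and s.endswith(comma):
--         s = s[:-1]
--     return int(changed), s
-- ===== Notes on version B (the rewrite author's own statement) =====
-- stated objective: alternative
-- what changed: Replaces the flat mutable worklist (pop from the front, push leftover tails and comma pieces back onto the same global list) by a per-word emitter whose inner while loop chops non-comma tails iteratively and recurses only on comma pieces, collecting chunks into a list that is space-joined once at the end.
import Mathlib
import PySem

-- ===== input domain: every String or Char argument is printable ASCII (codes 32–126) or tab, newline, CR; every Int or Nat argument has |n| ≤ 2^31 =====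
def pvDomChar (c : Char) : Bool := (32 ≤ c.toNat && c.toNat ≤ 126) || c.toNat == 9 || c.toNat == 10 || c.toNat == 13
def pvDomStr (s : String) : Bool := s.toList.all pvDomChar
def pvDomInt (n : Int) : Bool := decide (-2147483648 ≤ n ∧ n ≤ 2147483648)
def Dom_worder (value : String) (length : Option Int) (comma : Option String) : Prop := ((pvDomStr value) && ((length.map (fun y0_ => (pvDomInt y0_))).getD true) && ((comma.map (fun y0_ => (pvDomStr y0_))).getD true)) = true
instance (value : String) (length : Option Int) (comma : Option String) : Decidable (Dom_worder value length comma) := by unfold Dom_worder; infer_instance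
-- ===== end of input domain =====

-- B replaces A's flat mutable worklist by a per-word emitter (inner chopping loop, recursion
-- only on comma pieces) whose chunks are joined once at the end (alternative decomposition,
-- same return value; no speed claim).

-- ===== PORT A =====
-- A-side helpers: Python's `max_len = (not length or length < 0) and 50 or length`
-- (positive on every path: None/0/negative give 50, otherwise length > 0, so a Nat is exact)
-- and `comma`, with None and '' both falsy, read as the (possibly empty) character list.
def pvMaxLen (length : Option Int) : Nat :=
  match length with
  | none => 50
  | some l => if l ≤ 0 then 50 else l.toNat

theorem pvMaxLen_pos (length : Option Int) : 1 ≤ pvMaxLen length := by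
  unfold pvMaxLen
  cases length with
  | none => decide
  | some l =>
    by_cases h : l ≤ 0
    · simp [h]
    · simp [h]; omega

def pvComma (comma : Option String) : List Char :=
  match comma with
  | none => []
  | some c => c.toList

-- ----- termination facts, cited by name in the ports' decreasing_by -----
theorem pvDropWhile_len_le (p : Char → Bool) (l : List Char) : (l.dropWhile p).length ≤ l.length :=
  (List.dropWhile_sublist p).length_le

theorem pvRstrip_len_le (z : List Char) : (PySem.Chars.rstrip z).length ≤ z.length := by
  unfold PySem.Chars.rstrip
  simpa using pvDropWhile_len_le PySem.Chars.isspace z.reverse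

theorem pvStrip_len_le (s : List Char) : (PySem.Chars.strip s).length ≤ s.length := by
  unfold PySem.Chars.strip PySem.Chars.lstrip
  calc (PySem.Chars.rstrip (List.dropWhile PySem.Chars.isspace s)).length
      ≤ (List.dropWhile PySem.Chars.isspace s).length := pvRstrip_len_le _
    _ ≤ s.length := pvDropWhile_len_le _ _

theorem pvSpace_isspace : PySem.Chars.isspace ' ' = true := by decide

theorem pvRstrip_space (z : List Char) :
    PySem.Chars.rstrip (z ++ [' ']) = PySem.Chars.rstrip z := by
  unfold PySem.Chars.rstrip
  simp [pvSpace_isspace]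

-- a fragment ending in the appended ' ' loses that space again at the re-strip
theorem pvStrip_space_len_le (y : List Char) :
    (PySem.Chars.strip (y ++ [' '])).length ≤ y.length := by
  unfold PySem.Chars.strip
  unfold PySem.Chars.lstrip
  rw [List.dropWhile_append]
  split
  · simp [pvSpace_isspace]
    simp [PySem.Chars.rstrip]
  · rw [pvRstrip_space]
    calc (PySem.Chars.rstrip (List.dropWhile PySem.Chars.isspace y)).length
        ≤ (List.dropWhile PySem.Chars.isspace y).length := pvRstrip_len_le _
      _ ≤ y.length := pvDropWhile_len_le _ _

-- split(sep) invariant: every piece (plus one separator, once a separator occurs) fits in the input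
theorem pvGo_mem (sep : List Char) (hsep : sep ≠ []) :
    ∀ (fuel : Nat) (l cur : List Char) (acc : List (List Char)), l.length < fuel →
      ∀ x ∈ PySem.Chars.splitOn.go sep fuel l cur acc,
        x ∈ acc ∨ (x.length ≤ cur.length + l.length ∧
          (PySem.Chars.isIn sep l = true → x.length + sep.length ≤ cur.length + l.length)) := by
  intro fuel
  induction fuel with
  | zero => intro l cur acc h; omega
  | succ n ih =>
    intro l cur acc hfuel x hx
    rw [PySem.Chars.splitOn.go.eq_def] at hx
    have hseplen : 1 ≤ sep.length := by
      cases sep with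
      | nil => exact absurd rfl hsep
      | cons a b => simp
    cases l with
    | nil =>
      simp at hx
      rcases hx with h | h
      · exact Or.inl h
      · right
        refine ⟨by simp [h], ?_⟩
        intro hin
        rw [PySem.Chars.isIn_iff_infix] at hin
        simp at hin
        exact absurd hin hsep
    | cons ch rest =>
      have hfuel' : rest.length + 1 ≤ n := by
        simp only [List.length_cons] at hfuel
        omega
      simp only [] at hx
      split at hx
      · -- sep is a prefix: close the current piece, continue after the separator
        rename_i hpre
        have hdroplen : (List.drop sep.length (ch :: rest)).length < n := by
          simp only [List.length_drop, List.length_cons]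
          omega
        rcases ih (List.drop sep.length (ch :: rest)) [] (cur.reverse :: acc) hdroplen x hx
          with hmem | ⟨h1, h2⟩
        · rcases List.mem_cons.mp hmem with heq | hmem'
          · right
            subst heq
            refine ⟨by simp only [List.length_reverse, List.length_cons]; omega, ?_⟩
            intro hin
            rw [PySem.Chars.isIn_iff_infix] at hin
            have := hin.length_le
            simp only [List.length_reverse, List.length_cons] at *
            omega
          · exact Or.inl hmem'
        · right
          have hpl : sep.length ≤ rest.length + 1 := by
            have := (List.isPrefixOf_iff_prefix.mp hpre).length_le
            simpa using this
          have hd : (List.drop sep.length (ch :: rest)).length + sep.length = rest.length + 1 := by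
            simp only [List.length_drop, List.length_cons]
            omega
          simp only [List.length_nil, Nat.zero_add] at h1
          refine ⟨by simp only [List.length_cons]; omega,
                  fun _ => by simp only [List.length_cons]; omega⟩
      · -- sep not a prefix here: move one character into the current piece
        rename_i hpre
        have hrestlen : rest.length < n := by omega
        rcases ih rest (ch :: cur) acc hrestlen x hx with hmem | ⟨h1, h2⟩
        · exact Or.inl hmem
        · right
          simp only [List.length_cons] at h1
          refine ⟨by simp only [List.length_cons]; omega, ?_⟩
          intro hin
          rw [PySem.Chars.isIn_iff_infix] at hin
          rcases List.infix_cons_iff.mp hin with hp | hi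
          · exact absurd (List.isPrefixOf_iff_prefix.mpr hp) (by simpa using hpre)
          · have := h2 ((PySem.Chars.isIn_iff_infix _ _).mpr hi)
            simp only [List.length_cons] at *
            omega

theorem pvSplitOn_mem_len (sep s : List Char) (hsep : sep ≠ [])
    (hin : PySem.Chars.isIn sep s = true)
    (x : List Char) (hx : x ∈ PySem.Chars.splitOn s sep) :
    x.length + sep.length ≤ s.length := by
  unfold PySem.Chars.splitOn at hx
  rcases pvGo_mem sep hsep (s.length + 1) s [] [] (by omega) x hx with h | ⟨h1, h2⟩
  · simp at h
  · simpa using h2 hin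

theorem pvGo_count (sep : List Char) (hsep : sep ≠ []) :
    ∀ (fuel : Nat) (l cur : List Char) (acc : List (List Char)),
      (PySem.Chars.splitOn.go sep fuel l cur acc).length ≤ acc.length + 1 + l.length := by
  intro fuel
  induction fuel with
  | zero =>
    intro l cur acc
    rw [PySem.Chars.splitOn.go.eq_def]
    simp
  | succ n ih =>
    intro l cur acc
    rw [PySem.Chars.splitOn.go.eq_def]
    cases l with
    | nil => simp
    | cons ch rest =>
      have hseplen : 1 ≤ sep.length := by
        cases sep with
        | nil => exact absurd rfl hsep
        | cons a b => simp
      simp only []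
      split
      · have := ih (List.drop sep.length (ch :: rest)) [] ((cur.reverse :: acc))
        simp at this ⊢
        omega
      · have := ih rest (ch :: cur) acc
        simp at this ⊢
        omega

theorem pvSplitOn_count (sep s : List Char) (hsep : sep ≠ []) :
    (PySem.Chars.splitOn s sep).length ≤ s.length + 1 := by
  unfold PySem.Chars.splitOn
  have := pvGo_count sep hsep (s.length + 1) s [] []
  simp at this
  omega

-- one piece of the comma expansion, after the re-strip, fits under w's length
theorem pvPiece_len_le (c : List Char) (hc : c ≠ []) (w x : List Char)
    (hin : PySem.Chars.isIn c w = true) (hx : x ∈ PySem.Chars.splitOn w c) :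
    (PySem.Chars.strip (PySem.Chars.strip x ++ c ++ [' '])).length ≤ w.length := by
  calc (PySem.Chars.strip ((PySem.Chars.strip x ++ c) ++ [' '])).length
      ≤ (PySem.Chars.strip x ++ c).length := pvStrip_space_len_le _
    _ = (PySem.Chars.strip x).length + c.length := by simp
    _ ≤ x.length + c.length := by have := pvStrip_len_le x; omega
    _ ≤ w.length := pvSplitOn_mem_len c w hc hin x hx

theorem pvFact_lt_fact_succ (L : Nat) (hL : 1 ≤ L) : Nat.factorial L < Nat.factorial (L + 1) := by
  rw [Nat.factorial_succ]
  calc Nat.factorial L = 1 * Nat.factorial L := (one_mul _).symm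
    _ < (L + 1) * Nat.factorial L :=
        Nat.mul_lt_mul_of_lt_of_le (by omega) (le_refl _) (Nat.factorial_pos L)

-- the factorial measure of all comma pieces together stays below the popped word's entry
theorem pvPieces_sum_lt (c : List Char) (hc : c ≠ []) (L m : Nat) (hm : 1 ≤ m) (hLm : m < L)
    (w : List Char) (hw : w.length = L - m) (hin : PySem.Chars.isIn c w = true) :
    (((PySem.Chars.splitOn w c).map
        (fun x => PySem.Chars.strip x ++ c ++ [' '])).map
        (fun p => Nat.factorial ((PySem.Chars.strip p).length + 1))).sum
      < Nat.factorial (L + 1) := by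
  rw [List.map_map]
  have hterm : ∀ y ∈ (PySem.Chars.splitOn w c).map
      ((fun p => Nat.factorial ((PySem.Chars.strip p).length + 1)) ∘
        (fun x => PySem.Chars.strip x ++ c ++ [' '])),
      y ≤ Nat.factorial L := by
    intro y hy
    rcases List.mem_map.mp hy with ⟨x, hx, rfl⟩
    simp only [Function.comp_apply]
    apply Nat.factorial_le
    have h1 := pvPiece_len_le c hc w x hin hx
    omega
  have hsum := List.sum_le_card_nsmul _ _ hterm
  rw [List.length_map, smul_eq_mul] at hsum
  have hcount := pvSplitOn_count c w hc
  have hcount' : (PySem.Chars.splitOn w c).length ≤ L := by omega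
  calc (((PySem.Chars.splitOn w c).map _).sum)
      ≤ (PySem.Chars.splitOn w c).length * Nat.factorial L := hsum
    _ ≤ L * Nat.factorial L := Nat.mul_le_mul_right _ hcount'
    _ < (L + 1) * Nat.factorial L :=
        Nat.mul_lt_mul_of_lt_of_le (by omega) (le_refl _) (Nat.factorial_pos L)
    _ = Nat.factorial (L + 1) := (Nat.factorial_succ L).symm

-- A's while loop: pop the front word, append it (or its head) to s, push leftovers back.
def worderLoop (m : Nat) (hm : 1 ≤ m) (c : List Char)
    (ws : List (List Char)) (s : List Char) (ch : Int) : Int × List Char :=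
  match ws with
  | [] => (ch, s)
  | w0 :: rest =>
    let word := PySem.Chars.strip w0
    let s1 := if s = [] then s else s ++ [' ']
    if word.length ≤ m then
      worderLoop m hm c rest (s1 ++ word) ch
    else
      let w := PySem.Chars.slice word (some (m : Int)) none
      if c ≠ [] ∧ PySem.Chars.isIn c w then
        worderLoop m hm c
          (((PySem.Chars.splitOn w c).map
              (fun x => PySem.Chars.strip x ++ c ++ [' '])) ++ rest)
          (s1 ++ PySem.Chars.slice word none (some (m : Int))) 1
      else
        worderLoop m hm c (w :: rest)
          (s1 ++ PySem.Chars.slice word none (some (m : Int))) 1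
termination_by (ws.map (fun w => Nat.factorial ((PySem.Chars.strip w).length + 1))).sum
decreasing_by
  · simp only [List.map_cons, List.sum_cons]
    have := Nat.factorial_pos ((PySem.Chars.strip w0).length + 1)
    omega
  · rename_i hlong hcomma
    simp only [word] at hlong
    simp only [List.map_cons, List.sum_cons, List.map_append, List.sum_append]
    have hlt : (((PySem.Chars.splitOn (PySem.Chars.slice (PySem.Chars.strip w0) (some (m : Int)) none) c).map
          (fun x => PySem.Chars.strip x ++ c ++ [' '])).map
          (fun p => Nat.factorial ((PySem.Chars.strip p).length + 1))).sum
        < Nat.factorial ((PySem.Chars.strip w0).length + 1) := by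
      apply pvPieces_sum_lt c hcomma.1 ((PySem.Chars.strip w0).length) m hm (by omega)
      · simp [PySem.Chars.slice_eq_listSlice, PySem.List.slice_from_natCast]
      · exact hcomma.2
    rw [List.map_map] at hlt ⊢
    omega
  · rename_i hlong hcomma
    clear hcomma
    simp only [word] at hlong
    simp only [List.map_cons, List.sum_cons]
    have h1 : (PySem.Chars.strip (PySem.Chars.slice (PySem.Chars.strip w0) (some (m : Int)) none)).length + 1
        ≤ (PySem.Chars.strip w0).length := by
      have h2 := pvStrip_len_le (PySem.Chars.slice (PySem.Chars.strip w0) (some (m : Int)) none)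
      have h3 : (PySem.Chars.slice (PySem.Chars.strip w0) (some (m : Int)) none).length
          = (PySem.Chars.strip w0).length - m := by
        simp [PySem.Chars.slice_eq_listSlice, PySem.List.slice_from_natCast]
      omega
    have h4 := Nat.factorial_le h1
    have h5 := pvFact_lt_fact_succ ((PySem.Chars.strip w0).length) (by omega)
    omega

def worder (value : String) (length : Option Int) (comma : Option String) : Int × String :=
  let m := pvMaxLen length
  let c := pvComma comma
  let r := worderLoop m (pvMaxLen_pos length) c (PySem.Chars.split₀ value.toList) [] 0
  let s := PySem.Chars.strip r.2
  let s := if c ≠ [] ∧ PySem.Chars.endswith s c then PySem.Chars.slice s none (some (-1)) else s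
  (r.1, String.ofList s)

-- ===== PORT B =====
-- B-side helpers.  `m = length if length and length > 0 else 50`:
def altMax (length : Option Int) : Nat :=
  match length with
  | some l => if 0 < l then l.toNat else 50
  | none => 50

theorem altMax_pos (length : Option Int) : 1 ≤ altMax length := by
  cases length with
  | none => decide
  | some l =>
    show 1 ≤ (if 0 < l then l.toNat else 50)
    split <;> omega

-- `comma and comma in z` (None and '' are falsy):
def altCommaIn (comma : Option String) (z : List Char) : Bool :=
  match comma with
  | none => false
  | some cs => !cs.toList.isEmpty && PySem.Chars.isIn cs.toList z

-- B's emitter for one fragment: the inner `while True` chopping loop, recursing only on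
-- comma pieces; returns the chunks it appends and whether it truncated anything.
def emitFrag (m : Nat) (hm : 1 ≤ m) (comma : Option String) (frag : List Char) :
    List (List Char) × Bool :=
  let f := PySem.Chars.strip frag
  if f.length ≤ m then ([f], false)
  else
    let tail := f.drop m
    if hcm : altCommaIn comma tail then
      match comma, hcm with
      | some cs, _ =>
        (f.take m ::
          ((PySem.Chars.splitOn tail cs.toList).attach.flatMap
            (fun p => (emitFrag m hm comma (PySem.Chars.strip p.1 ++ cs.toList ++ [' '])).1)),
         true)
    else
      (f.take m :: (emitFrag m hm comma tail).1, true)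
termination_by (PySem.Chars.strip frag).length
decreasing_by
  · have h0 : ¬ (PySem.Chars.strip frag).length ≤ m := ‹¬ f.length ≤ m›
    have hcs : cs.toList ≠ [] ∧ PySem.Chars.isIn cs.toList tail = true := by
      have hc := ‹altCommaIn (some cs) tail = true›
      simpa [altCommaIn, List.isEmpty_eq_false_iff] using hc
    have h1 := pvPiece_len_le cs.toList hcs.1 tail p.1 hcs.2 p.2
    have h2 : tail.length = (PySem.Chars.strip frag).length - m := by
      simp [tail, f]
    omega
  · have h0 : ¬ (PySem.Chars.strip frag).length ≤ m := ‹¬ f.length ≤ m›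
    have h2 := pvStrip_len_le (List.drop m (PySem.Chars.strip frag))
    have h3 : (List.drop m (PySem.Chars.strip frag)).length
        = (PySem.Chars.strip frag).length - m := by simp
    omega

def worder_alt (value : String) (length : Option Int) (comma : Option String) : Int × String :=
  let run := (PySem.Chars.split₀ value.toList).foldl
    (fun (acc : List (List Char) × Bool) w =>
      let r := emitFrag (altMax length) (altMax_pos length) comma w
      (acc.1 ++ r.1, acc.2 || r.2))
    ([], false)
  let s := PySem.Chars.strip (List.intercalate [' '] run.1)
  let s :=
    match comma with
    | some cs => if !cs.toList.isEmpty && PySem.Chars.endswith s cs.toList then s.dropLast else s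
    | none => s
  ((if run.2 then 1 else 0), String.ofList s)

-- ===== PRECONDITION & SPEC =====
def Spec_worder (value : String) (length : Option Int) (comma : Option String) (out : Int × String) : Prop := out = worder_alt value length comma
instance (value : String) (length : Option Int) (comma : Option String) (out : Int × String) : Decidable (Spec_worder value length comma out) := by unfold Spec_worder; infer_instance

-- ===== CLAIM (what is proved, stated in full; the proofs are below) =====
def Claim_equal_worder : Prop := ∀ (value : String) (length : Option Int) (comma : Option String), Dom_worder value length comma → Spec_worder value length comma (worder value length comma)

-- ===== LEMMAS AND PROOFS =====
theorem pvMax_eq (length : Option Int) : pvMaxLen length = altMax length := by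
  cases length with
  | none => rfl
  | some l =>
    show (if l ≤ 0 then (50:Nat) else l.toNat) = (if 0 < l then l.toNat else 50)
    by_cases h : l ≤ 0
    · rw [if_pos h, if_neg (by omega)]
    · rw [if_neg h, if_pos (by omega)]

theorem pvCommaIn_iff (comma : Option String) (z : List Char) :
    altCommaIn comma z = true ↔ (pvComma comma ≠ [] ∧ PySem.Chars.isIn (pvComma comma) z = true) := by
  cases comma with
  | none => simp [altCommaIn, pvComma]
  | some cs =>
    simp [altCommaIn, pvComma, Bool.and_eq_true, List.isEmpty_eq_false_iff]

-- A's incremental accumulation, as a fold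
def pvFoldJ (s : List Char) (cks : List (List Char)) : List Char :=
  cks.foldl (fun s ck => (if s = [] then s else s ++ [' ']) ++ ck) s

theorem pvFoldJ_nonempty (cks : List (List Char)) :
    ∀ (s : List Char), s ≠ [] →
      pvFoldJ s cks = s ++ (cks.flatMap (fun c => ' ' :: c)) := by
  induction cks with
  | nil => intro s _; simp [pvFoldJ]
  | cons c cks ih =>
    intro s hs
    unfold pvFoldJ
    simp only [List.foldl_cons, if_neg hs]
    have : (pvFoldJ (s ++ [' '] ++ c) cks) = (s ++ [' '] ++ c) ++ (cks.flatMap (fun c => ' ' :: c)) :=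
      ih _ (by simp)
    unfold pvFoldJ at this
    rw [this]
    simp

theorem pvStrip_cons_space (x : List Char) :
    PySem.Chars.strip (' ' :: x) = PySem.Chars.strip x := by
  unfold PySem.Chars.strip PySem.Chars.lstrip
  simp [pvSpace_isspace]

theorem pvIntercalate_space (c : List Char) (cks : List (List Char)) :
    List.intercalate [' '] (c :: cks) = c ++ (cks.flatMap (fun c => ' ' :: c)) := by
  induction cks generalizing c with
  | nil => simp [List.intercalate]
  | cons d cks ih =>
    rw [show List.intercalate [' '] (c :: d :: cks) = c ++ [' '] ++ List.intercalate [' '] (d :: cks) by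
      simp [List.intercalate, List.intersperse]]
    rw [ih d]
    simp

theorem pvStrip_foldJ_eq_join (cks : List (List Char)) :
    PySem.Chars.strip (pvFoldJ [] cks) = PySem.Chars.strip (List.intercalate [' '] cks) := by
  induction cks with
  | nil => simp [pvFoldJ, List.intercalate]
  | cons c cks ih =>
    have hstep : pvFoldJ [] (c :: cks) = pvFoldJ c cks := by
      unfold pvFoldJ
      simp
    rw [hstep, pvIntercalate_space]
    by_cases hc : c = []
    · subst hc
      simp only [List.nil_append]
      rw [ih]
      cases cks with
      | nil => simp [List.intercalate]
      | cons d cks' =>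
        rw [pvIntercalate_space]
        simp only [List.flatMap_cons, List.cons_append]
        exact (pvStrip_cons_space _).symm
    · rw [pvFoldJ_nonempty cks c hc]

-- the characterization of emitFrag used when unfolding A's loop, attach removed
theorem pvEmit_fit (m : Nat) (hm : 1 ≤ m) (comma : Option String) (frag : List Char)
    (h : (PySem.Chars.strip frag).length ≤ m) :
    emitFrag m hm comma frag = ([PySem.Chars.strip frag], false) := by
  rw [emitFrag]
  simp [h]

theorem pvEmit_comma (m : Nat) (hm : 1 ≤ m) (cs : String) (frag : List Char)
    (h : ¬ (PySem.Chars.strip frag).length ≤ m)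
    (hcm : altCommaIn (some cs) ((PySem.Chars.strip frag).drop m) = true) :
    emitFrag m hm (some cs) frag =
      ((PySem.Chars.strip frag).take m ::
        (((PySem.Chars.strip frag).drop m |> (PySem.Chars.splitOn · cs.toList)).flatMap
          (fun p => (emitFrag m hm (some cs) (PySem.Chars.strip p ++ cs.toList ++ [' '])).1)),
       true) := by
  rw [emitFrag]
  simp [h, hcm]

theorem pvEmit_plain (m : Nat) (hm : 1 ≤ m) (comma : Option String) (frag : List Char)
    (h : ¬ (PySem.Chars.strip frag).length ≤ m)
    (hcm : altCommaIn comma ((PySem.Chars.strip frag).drop m) = false) :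
    emitFrag m hm comma frag =
      ((PySem.Chars.strip frag).take m ::
        (emitFrag m hm comma ((PySem.Chars.strip frag).drop m)).1, true) := by
  rw [emitFrag]
  simp only [h, if_false, hcm]
  simp

-- A's slices are B's take/drop
theorem pvSlice_take (z : List Char) (m : Nat) :
    PySem.Chars.slice z none (some (m : Int)) = z.take m := by
  simp [PySem.Chars.slice_eq_listSlice, PySem.List.slice_to_natCast]

theorem pvSlice_drop (z : List Char) (m : Nat) :
    PySem.Chars.slice z (some (m : Int)) none = z.drop m := by
  simp [PySem.Chars.slice_eq_listSlice, PySem.List.slice_from_natCast]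

-- the two ports' max_len computations agree (proofs of positivity are irrelevant)
theorem pvLoop_irrel (m1 m2 : Nat) (h1 : 1 ≤ m1) (h2 : 1 ≤ m2) (he : m1 = m2)
    (c : List Char) (ws : List (List Char)) (s : List Char) (ch : Int) :
    worderLoop m1 h1 c ws s ch = worderLoop m2 h2 c ws s ch := by
  subst he
  rfl

-- one accumulation step of A's string building
theorem pvFoldJ_cons (s c : List Char) (t : List (List Char)) :
    pvFoldJ s (c :: t) = pvFoldJ ((if s = [] then s else s ++ [' ']) ++ c) t := by
  unfold pvFoldJ
  simp

-- A's worklist loop computes exactly the chunks B's emitter emits, left to right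
theorem pvLoop_eq_emit (m : Nat) (hm : 1 ≤ m) (comma : Option String) :
    ∀ (ws : List (List Char)) (s : List Char) (ch : Int),
      worderLoop m hm (pvComma comma) ws s ch =
        ((if ws.any (fun w => (emitFrag m hm comma w).2) then 1 else ch),
         pvFoldJ s (ws.flatMap (fun w => (emitFrag m hm comma w).1))) := by
  intro ws s ch
  induction ws, s, ch using worderLoop.induct m hm (pvComma comma) with
  | case1 s ch => simp [worderLoop, pvFoldJ]
  | case2 s ch w0 rest word s1 hle ih =>
    simp only [word, s1] at hle ih
    simp only [dite_eq_ite] at ih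
    rw [worderLoop, if_pos hle, ih]
    simp only [List.any_cons, List.flatMap_cons, pvEmit_fit m hm comma w0 hle,
      List.singleton_append, pvFoldJ_cons, Bool.false_or]
  | case3 s ch w0 rest word s1 hle w hcx ih =>
    simp only [word] at hle
    simp only [word, s1, w] at hcx ih
    -- the comma branch: comma is some cs, nonempty, occurring in the tail
    have hcs : ∃ cs : String, comma = some cs := by
      cases comma with
      | none => exact absurd hcx.1 (by simp [pvComma])
      | some cs => exact ⟨cs, rfl⟩
    rcases hcs with ⟨cs, rfl⟩
    simp only [dite_eq_ite] at ih
    have hcl : pvComma (some cs) = cs.toList := rfl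
    have hcm : altCommaIn (some cs) ((PySem.Chars.strip w0).drop m) = true := by
      rw [pvCommaIn_iff]
      rw [← pvSlice_drop]
      exact hcx
    have he := pvEmit_comma m hm cs w0 hle hcm
    rw [worderLoop, if_neg hle, if_pos hcx, ih]
    simp only [List.any_cons, List.flatMap_cons, List.any_append, List.flatMap_append,
      List.flatMap_map, hcl, pvSlice_drop, pvSlice_take, he]
    rw [List.cons_append, pvFoldJ_cons]
    simp
  | case4 s ch w0 rest word s1 hle w hcx ih =>
    simp only [word] at hle
    simp only [word, s1, w] at hcx ih
    simp only [dite_eq_ite] at ih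
    have hcm : altCommaIn comma ((PySem.Chars.strip w0).drop m) = false := by
      rw [Bool.eq_false_iff]
      intro hco
      rw [pvCommaIn_iff, ← pvSlice_drop] at hco
      exact hcx hco
    have he := pvEmit_plain m hm comma w0 hle hcm
    rw [worderLoop, if_neg hle, if_neg hcx, ih]
    simp only [List.any_cons, List.flatMap_cons, pvSlice_drop, pvSlice_take, he]
    rw [List.cons_append, pvFoldJ_cons]
    simp

-- B's single fold over the words splits into the chunk concatenation and the or of the flags
theorem pvRun_eq (m : Nat) (hm : 1 ≤ m) (comma : Option String) (ws : List (List Char)) :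
    ∀ (acc : List (List Char) × Bool),
      ws.foldl (fun (acc : List (List Char) × Bool) w =>
          (acc.1 ++ (emitFrag m hm comma w).1, acc.2 || (emitFrag m hm comma w).2)) acc
        = (acc.1 ++ ws.flatMap (fun w => (emitFrag m hm comma w).1),
           acc.2 || ws.any (fun w => (emitFrag m hm comma w).2)) := by
  induction ws with
  | nil => intro acc; simp
  | cons w ws ih =>
    intro acc
    simp only [List.foldl_cons, List.flatMap_cons, List.any_cons]
    rw [ih]
    simp [Bool.or_assoc]

-- the final trailing-comma trim, both spellings
theorem pvTrim_eq (comma : Option String) (s : List Char) :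
    (if pvComma comma ≠ [] ∧ PySem.Chars.endswith s (pvComma comma) then
        PySem.Chars.slice s none (some (-1)) else s)
      = (match comma with
         | some cs => if !cs.toList.isEmpty && PySem.Chars.endswith s cs.toList then s.dropLast else s
         | none => s) := by
  cases comma with
  | none => simp [pvComma]
  | some cs =>
    simp only [pvComma]
    by_cases h : cs.toList ≠ [] ∧ PySem.Chars.endswith s cs.toList = true
    · rw [if_pos h]
      have : (!cs.toList.isEmpty && PySem.Chars.endswith s cs.toList) = true := by
        simp [List.isEmpty_eq_false_iff, h.1, h.2]
      rw [this]
      simp only [if_true]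
      simp [PySem.Chars.slice_eq_listSlice, PySem.List.slice_to_neg_one]
    · rw [if_neg h]
      have : (!cs.toList.isEmpty && PySem.Chars.endswith s cs.toList) = false := by
        rcases (not_and_or.mp h) with h1 | h2
        · simp only [ne_eq, not_not] at h1
          simp [h1]
        · simp [Bool.eq_false_iff.mpr h2]
      rw [this]
      simp

-- ===== VERDICT (by name: the statement is the Claim_ definition above) =====
theorem worder_spec : Claim_equal_worder := by
  intro value length comma _
  unfold Spec_worder
  simp only [worder, worder_alt]
  rw [pvLoop_irrel (pvMaxLen length) (altMax length) (pvMaxLen_pos length) (altMax_pos length)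
    (pvMax_eq length)]
  rw [pvLoop_eq_emit (altMax length) (altMax_pos length) comma]
  rw [pvRun_eq]
  simp only [List.nil_append, Bool.false_or]
  simp only [Prod.mk.injEq]
  constructor
  · trivial
  · rw [← pvTrim_eq]
    rw [pvStrip_foldJ_eq_join]
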